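-- pv_equiv track=rewrite | github.com/farouqaIyad/albaz | function.py | split_words_with_last_indicator
-- ===== SOURCE A (Python) =====
-- import unicodedata
--
-- def split_words_with_last_indicator(text):
--     normalized_text = unicodedata.normalize("NFC", text)
--
--     words = normalized_text.split()
--
--     if not words:
--         return []
--
--     result = [
--         (word, "last" if i == len(words) - 1 else "other")
--         for i, word in enumerate(words)
--     ]
--
--     return result
-- ===== SOURCE B (Python) =====
-- import unicodedata
--
-- def split_words_with_last_indicator(text):
--     s = unicodedata.normalize("NFC", text)
--     result = []
--     buf = []
--     tag = "last"
--     for ch in reversed(s):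
--         if ch.isspace():
--             if buf:
--                 result.append(("".join(reversed(buf)), tag))
--                 tag = "other"
--                 buf = []
--         else:
--             buf.append(ch)
--     if buf:
--         result.append(("".join(reversed(buf)), tag))
--     result.reverse()
--     return result
-- ===== Notes on version B (the rewrite author's own statement) =====
-- stated objective: alternative
-- what changed: B drops str.split()/enumerate entirely and tokenizes the text itself with one character-level reverse scan: walking the string from the end it builds each word in a buffer, marks the first word it completes (the final word of the text) with the last-word tag and every later one with the ordinary tag, then reverses the collected list.
import Mathlib
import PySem

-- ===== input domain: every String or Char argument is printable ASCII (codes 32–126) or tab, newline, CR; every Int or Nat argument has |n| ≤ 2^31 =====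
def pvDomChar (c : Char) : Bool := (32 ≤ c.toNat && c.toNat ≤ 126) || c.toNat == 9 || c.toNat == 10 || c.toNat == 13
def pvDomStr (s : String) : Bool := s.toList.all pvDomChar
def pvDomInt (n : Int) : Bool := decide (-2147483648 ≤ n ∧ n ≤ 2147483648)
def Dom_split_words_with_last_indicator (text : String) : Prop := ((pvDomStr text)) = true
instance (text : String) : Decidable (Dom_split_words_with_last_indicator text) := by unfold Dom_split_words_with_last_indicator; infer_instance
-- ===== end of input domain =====

-- B replaces str.split()+enumerate by a single hand-written character-level reverse scan that
-- tokenizes the text itself, tagging the first word it completes "last" (objective: alternative).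
-- NFC normalization is the identity on the ASCII domain, so both ports omit it (exact on Dom).

-- ===== PORT A =====
def split_words_with_last_indicator (text : String) : List (String × String) :=
  let words := PySem.Str.split₀ text
  if words = [] then []
  else
    (PySem.List.enumerate words 0).map
      (fun p => (p.2, if p.1 = (words.length : Int) - 1 then "last" else "other"))

-- ===== PORT B =====
-- the reverse-scan loop of Source B: state (buf, tag, result); ''.join(reversed(buf)) = String.ofList buf.reverse
def pvRevScan : List Char → List Char → String → List (String × String) → List (String × String)
  | [], buf, tag, res =>
      (if buf ≠ [] then res ++ [(String.ofList buf.reverse, tag)] else res).reverse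
  | c :: rest, buf, tag, res =>
      if PySem.Chars.isspace c then
        if buf ≠ [] then pvRevScan rest [] "other" (res ++ [(String.ofList buf.reverse, tag)])
        else pvRevScan rest buf tag res
      else pvRevScan rest (buf ++ [c]) tag res

def split_words_with_last_indicator_alt (text : String) : List (String × String) :=
  pvRevScan text.toList.reverse [] "last" []

-- ===== PRECONDITION & SPEC =====
def Spec_split_words_with_last_indicator (text : String) (out : List (String × String)) : Prop := out = split_words_with_last_indicator_alt text
instance (text : String) (out : List (String × String)) : Decidable (Spec_split_words_with_last_indicator text out) := by unfold Spec_split_words_with_last_indicator; infer_instance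

-- ===== CLAIM (what is proved, stated in full; the proofs are below) =====
def Claim_equal_split_words_with_last_indicator : Prop := ∀ (text : String), Dom_split_words_with_last_indicator text → Spec_split_words_with_last_indicator text (split_words_with_last_indicator text)

-- ===== LEMMAS AND PROOFS =====

-- words tagged "other" except the last, which gets `tag` (the common value of both sides)
def pvTagFwd : List (List Char) → String → List (String × String)
  | [], _ => []
  | [w], tag => [(String.ofList w, tag)]
  | w :: v :: ws, tag => (String.ofList w, "other") :: pvTagFwd (v :: ws) tag

theorem pvTagFwd_other (ws : List (List Char)) :
    pvTagFwd ws "other" = ws.map (fun w => (String.ofList w, "other")) := by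
  induction ws with
  | nil => rfl
  | cons w ws ih =>
      cases ws with
      | nil => rfl
      | cons v vs => simp [pvTagFwd, ih]

theorem pvTagFwd_concat (ws : List (List Char)) (w : List Char) (tag : String) :
    pvTagFwd (ws ++ [w]) tag = pvTagFwd ws "other" ++ [(String.ofList w, tag)] := by
  induction ws with
  | nil => rfl
  | cons v vs ih =>
      cases vs with
      | nil => rfl
      | cons u us =>
          simp only [List.cons_append, pvTagFwd]
          exact congrArg (List.cons _) ih

-- split₀.go on an all-non-space input: one word (or none)
theorem split₀go_nonspace (w : List Char) (hw : ∀ d ∈ w, PySem.Chars.isspace d = false) :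
    ∀ cur acc, PySem.Chars.split₀.go w cur acc =
      if cur.reverse ++ w = [] then acc.reverse else acc.reverse ++ [cur.reverse ++ w] := by
  induction w with
  | nil =>
      intro cur acc
      simp only [PySem.Chars.split₀.go, List.append_nil]
      cases cur with
      | nil => simp
      | cons c cs => simp
  | cons d w ih =>
      intro cur acc
      have hd : PySem.Chars.isspace d = false := hw d (by simp)
      have hw' : ∀ d ∈ w, PySem.Chars.isspace d = false := fun x hx => hw x (by simp [hx])
      simp only [PySem.Chars.split₀.go, hd, Bool.false_eq_true, if_false]
      rw [ih hw' (d :: cur) acc]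
      simp

-- trailing space is ignored by split₀.go
theorem split₀go_append_space (c : Char) (hc : PySem.Chars.isspace c = true) (xs : List Char) :
    ∀ cur acc, PySem.Chars.split₀.go (xs ++ [c]) cur acc = PySem.Chars.split₀.go xs cur acc := by
  induction xs with
  | nil =>
      intro cur acc
      simp only [List.nil_append, PySem.Chars.split₀.go, hc, if_true]
      by_cases h : cur.isEmpty = true <;> simp [h]
  | cons x xs ih =>
      intro cur acc
      simp only [List.cons_append, PySem.Chars.split₀.go]
      split_ifs <;> exact ih _ _

-- a space then a final all-non-space word: the word is appended as one token
theorem split₀go_append_word (c : Char) (hc : PySem.Chars.isspace c = true)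
    (w : List Char) (hne : w ≠ []) (hw : ∀ d ∈ w, PySem.Chars.isspace d = false) (xs : List Char) :
    ∀ cur acc, PySem.Chars.split₀.go (xs ++ c :: w) cur acc = PySem.Chars.split₀.go xs cur acc ++ [w] := by
  induction xs with
  | nil =>
      intro cur acc
      simp only [List.nil_append, PySem.Chars.split₀.go, hc, if_true]
      by_cases h : cur.isEmpty = true
      · rw [split₀go_nonspace w hw [] acc]
        simp [h, hne]
      · rw [split₀go_nonspace w hw [] (cur.reverse :: acc)]
        simp [h, hne]
  | cons x xs ih =>
      intro cur acc
      simp only [List.cons_append, PySem.Chars.split₀.go]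
      split_ifs <;> exact ih _ _

theorem split₀_nonspace (w : List Char) (hw : ∀ d ∈ w, PySem.Chars.isspace d = false) :
    PySem.Chars.split₀ w = if w = [] then [] else [w] := by
  rw [PySem.Chars.split₀, split₀go_nonspace w hw [] []]; simp

-- the loop invariant of B's reverse scan: cs are the still-unprocessed characters (in reverse
-- order), buf the non-space characters of the partially read word (in reverse order)
theorem pvRevScan_eq (cs : List Char) :
    ∀ buf tag res, (∀ d ∈ buf, PySem.Chars.isspace d = false) →
      pvRevScan cs buf tag res =
        pvTagFwd (PySem.Chars.split₀ (cs.reverse ++ buf.reverse)) tag ++ res.reverse := by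
  induction cs with
  | nil =>
      intro buf tag res hbuf
      have hb : ∀ d ∈ buf.reverse, PySem.Chars.isspace d = false := by
        intro d hd; exact hbuf d (List.mem_reverse.mp hd)
      simp only [pvRevScan, List.reverse_nil, List.nil_append]
      rw [split₀_nonspace buf.reverse hb]
      by_cases h : buf = []
      · simp [h, pvTagFwd]
      · simp [h, pvTagFwd]
  | cons c cs ih =>
      intro buf tag res hbuf
      simp only [pvRevScan, List.reverse_cons, List.append_assoc]
      by_cases hc : PySem.Chars.isspace c = true
      · simp only [hc, if_true]
        by_cases hb : buf = []
        · simp only [hb, ne_eq, not_true_eq_false, if_false]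
          rw [ih [] tag res (by simp)]
          simp only [List.reverse_nil, List.append_nil]
          rw [PySem.Chars.split₀, PySem.Chars.split₀,
            split₀go_append_space c hc cs.reverse [] []]
        · simp only [ne_eq, hb, not_false_eq_true, if_true]
          rw [ih [] "other" (res ++ [(String.ofList buf.reverse, tag)]) (by simp)]
          simp only [List.reverse_nil, List.append_nil, List.singleton_append]
          have hbr : buf.reverse ≠ [] := by simpa using hb
          have hwb : ∀ d ∈ buf.reverse, PySem.Chars.isspace d = false := by
            intro d hd; exact hbuf d (List.mem_reverse.mp hd)
          rw [PySem.Chars.split₀, PySem.Chars.split₀,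
            split₀go_append_word c hc buf.reverse hbr hwb cs.reverse [] [],
            ← PySem.Chars.split₀, pvTagFwd_concat]
          simp
      · simp only [hc]
        have hc' : PySem.Chars.isspace c = false := by
          cases h : PySem.Chars.isspace c with
          | false => rfl
          | true => exact absurd h hc
        rw [ih (buf ++ [c]) tag res (by
          intro d hd
          rcases List.mem_append.mp hd with h | h
          · exact hbuf d h
          · simp at h; subst h; exact hc')]
        simp

-- A's enumerate-comprehension over a nonempty word list produces the same tagged list
theorem pvEnum_tag (ws : List (List Char)) (z : List Char) :
    (PySem.List.enumerate ((ws ++ [z]).map String.ofList) 0).map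
      (fun p => (p.2, if p.1 = (((ws ++ [z]).map String.ofList).length : Int) - 1 then "last" else "other"))
      = pvTagFwd (ws ++ [z]) "last" := by
  rw [pvTagFwd_concat]
  simp only [List.map_append, List.map_cons, List.map_nil]
  rw [PySem.List.enumerate_append]
  simp only [List.map_append, List.length_append, List.length_map, List.length_singleton]
  congr 1
  · have hmm : ws.map (fun w => (String.ofList w, "other"))
        = (ws.map String.ofList).map (fun s => (s, "other")) := by simp
    rw [pvTagFwd_other, hmm]
    conv_rhs => rw [← PySem.List.map_snd_enumerate (ws.map String.ofList) 0, List.map_map]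
    apply List.map_congr_left
    intro p hp
    obtain ⟨k, hk, rfl⟩ := (PySem.List.mem_enumerate_iff (ws.map String.ofList) 0 p).1 hp
    simp only [Function.comp]
    rw [if_neg (by simp at hk; push_cast; omega)]
  · simp [PySem.List.enumerate]

-- ===== VERDICT (by name: the statement is the Claim_ definition above) =====
theorem split_words_with_last_indicator_spec : Claim_equal_split_words_with_last_indicator := by
  intro text _
  unfold Spec_split_words_with_last_indicator split_words_with_last_indicator split_words_with_last_indicator_alt
  rw [pvRevScan_eq text.toList.reverse [] "last" [] (by simp)]
  simp only [List.reverse_reverse, List.reverse_nil, List.append_nil]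
  have hsplit : PySem.Str.split₀ text = (PySem.Chars.split₀ text.toList).map String.ofList := rfl
  by_cases h : PySem.Chars.split₀ text.toList = []
  · simp [hsplit, h, pvTagFwd]
  · obtain ⟨ws, z, hyz⟩ := (List.eq_nil_or_concat (PySem.Chars.split₀ text.toList)).resolve_left h
    rw [List.concat_eq_append] at hyz
    rw [hsplit, hyz, if_neg (by simp)]
    exact pvEnum_tag ws z
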